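-- pv_equiv track=rewrite | github.com/mindspore-ai/mindrlhf | mindrlhf/trainer/spmd/grpo_trainer.py | _remove_right_padding
-- ===== SOURCE A (Python) =====
-- def _remove_right_padding(token_ids, padding_token=0):
--     """ remove_right_padding """
--     trimmed_sequences = []
--     for seq in token_ids:
--         # 将序列转换为列表以处理不同输入类型（如numpy数组）
--         seq_list = list(seq)
--         # 逆序查找第一个非填充标记的位置
--         last_non_pad = next((i for i in reversed(
--             range(len(seq_list))) if seq_list[i] != padding_token), None)
--         # 截断右侧填充
--         if last_non_pad is not None:
--             trimmed_sequences.append(seq_list[:last_non_pad + 1])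
--         else:
--             trimmed_sequences.append([])  # 全为填充时返回空列表
--     return trimmed_sequences
-- ===== SOURCE B (Python) =====
-- def _remove_right_padding(token_ids, padding_token=0):
--     """Single forward pass per sequence, buffering runs of padding; a trailing
--     run is never flushed, which trims right padding."""
--     trimmed_sequences = []
--     for seq in token_ids:
--         out = []
--         pending = 0
--         for t in seq:
--             if t == padding_token:
--                 pending += 1
--             else:
--                 out.extend([padding_token] * pending)
--                 pending = 0
--                 out.append(t)
--         trimmed_sequences.append(out)
--     return trimmed_sequences
-- ===== Notes on version B (the rewrite author's own statement) =====
-- stated objective: alternative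
-- what changed: A reverse-scans each sequence for the last non-padding index and slices; B makes one forward pass per sequence, buffering runs of padding and flushing them only before a non-padding token, so the trailing run is dropped.
import Mathlib
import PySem

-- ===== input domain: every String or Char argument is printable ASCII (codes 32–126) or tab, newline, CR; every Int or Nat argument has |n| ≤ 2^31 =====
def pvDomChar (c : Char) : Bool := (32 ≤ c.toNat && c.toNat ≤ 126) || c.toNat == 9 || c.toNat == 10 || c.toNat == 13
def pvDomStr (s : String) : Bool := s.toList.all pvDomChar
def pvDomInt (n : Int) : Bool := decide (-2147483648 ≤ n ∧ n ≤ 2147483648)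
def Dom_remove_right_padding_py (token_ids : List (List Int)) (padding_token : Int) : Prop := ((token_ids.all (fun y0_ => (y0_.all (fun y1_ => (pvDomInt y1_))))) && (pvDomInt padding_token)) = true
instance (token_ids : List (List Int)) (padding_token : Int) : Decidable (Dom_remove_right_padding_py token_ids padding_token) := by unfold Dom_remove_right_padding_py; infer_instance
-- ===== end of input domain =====

-- B replaces A's reverse scan for the last non-padding index (then slice) by one forward
-- pass per sequence that buffers runs of padding and never flushes the trailing run
-- (objective: alternative decomposition, same cost).

-- ===== PORT A =====
-- `next((i for i in reversed(range(len(seq_list))) if seq_list[i] != padding_token), None)`: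
-- scan indices m-1, m-2, …, 0 for the first one holding a non-padding token.
-- Every probed index is in range, so `List.getD i padding_token` is exactly `seq_list[i]`.
def aFindLast (pad : Int) (seq : List Int) : Nat → Option Nat
  | 0 => none
  | m + 1 => if seq.getD m pad ≠ pad then some m else aFindLast pad seq m

def remove_right_padding_py (token_ids : List (List Int)) (padding_token : Int) : List (List Int) :=
  token_ids.map (fun seq =>
    match aFindLast padding_token seq seq.length with
    | some i => seq.take (i + 1)   -- seq_list[:last_non_pad + 1], 0 ≤ i+1 so the slice is `take`
    | none => [])

-- ===== PORT B =====
-- per-token step of Source B's inner loop: state = (out, pending)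
def bStep (pad : Int) (st : List Int × Nat) (t : Int) : List Int × Nat :=
  if t == pad then (st.1, st.2 + 1)
  else (st.1 ++ List.replicate st.2 pad ++ [t], 0)

def remove_right_padding_py_alt (token_ids : List (List Int)) (padding_token : Int) : List (List Int) :=
  token_ids.map (fun seq => (seq.foldl (bStep padding_token) ([], 0)).1)

-- ===== PRECONDITION & SPEC =====
def Spec_remove_right_padding_py (token_ids : List (List Int)) (padding_token : Int) (out : List (List Int)) : Prop := out = remove_right_padding_py_alt token_ids padding_token
instance (token_ids : List (List Int)) (padding_token : Int) (out : List (List Int)) : Decidable (Spec_remove_right_padding_py token_ids padding_token out) := by unfold Spec_remove_right_padding_py; infer_instance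

-- ===== CLAIM (what is proved, stated in full; the proofs are below) =====
def Claim_equal_remove_right_padding_py : Prop := ∀ (token_ids : List (List Int)) (padding_token : Int), Dom_remove_right_padding_py token_ids padding_token → Spec_remove_right_padding_py token_ids padding_token (remove_right_padding_py token_ids padding_token)

-- ===== LEMMAS AND PROOFS =====

-- canonical "drop trailing padding", by recursion on the structure
def rtrim (pad : Int) : List Int → List Int
  | [] => []
  | x :: xs =>
    match rtrim pad xs with
    | [] => if x = pad then [] else [x]
    | r => x :: r

theorem rtrim_append_pad (pad : Int) (ys : List Int) : rtrim pad (ys ++ [pad]) = rtrim pad ys := by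
  induction ys with
  | nil => simp [rtrim]
  | cons y ys ih =>
    rw [List.cons_append]
    show (match rtrim pad (ys ++ [pad]) with
      | [] => if y = pad then [] else [y]
      | r => y :: r) = rtrim pad (y :: ys)
    rw [ih]; rfl

theorem rtrim_append_nonpad (pad y : Int) (hy : y ≠ pad) (ys : List Int) :
    rtrim pad (ys ++ [y]) = ys ++ [y] := by
  induction ys with
  | nil => simp [rtrim, hy]
  | cons z ys ih =>
    rw [List.cons_append]
    show (match rtrim pad (ys ++ [y]) with
      | [] => if z = pad then [] else [z]
      | r => z :: r) = z :: (ys ++ [y])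
    rw [ih]
    cases h : ys ++ [y] with
    | nil => exact absurd h (by simp)
    | cons a l => rfl

theorem aFindLast_lt (pad : Int) (seq : List Int) :
    ∀ m i, aFindLast pad seq m = some i → i < m := by
  intro m
  induction m with
  | zero => intro i h; simp [aFindLast] at h
  | succ m ih =>
    intro i h
    rw [aFindLast] at h
    split at h
    · cases h; omega
    · exact Nat.lt_succ_of_lt (ih i h)

theorem aFindLast_append (pad : Int) (ys zs : List Int) :
    ∀ m, m ≤ ys.length → aFindLast pad (ys ++ zs) m = aFindLast pad ys m := by
  intro m
  induction m with
  | zero => intro _; rfl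
  | succ m ih =>
    intro hm
    have hlt : m < ys.length := by omega
    have hget : (ys ++ zs).getD m pad = ys.getD m pad := by
      simp [List.getD, List.getElem?_append_left hlt]
    rw [aFindLast, aFindLast, hget, ih (by omega)]

-- A's per-sequence result
def aTrim (pad : Int) (seq : List Int) : List Int :=
  match aFindLast pad seq seq.length with
  | some i => seq.take (i + 1)
  | none => []

theorem aTrim_eq_rtrim (pad : Int) (seq : List Int) : aTrim pad seq = rtrim pad seq := by
  induction seq using List.reverseRecOn with
  | nil => rfl
  | append_singleton ys y ih =>
    have hlen : (ys ++ [y]).length = ys.length + 1 := by simp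
    have hget : (ys ++ [y]).getD ys.length pad = y := by
      simp [List.getD]
    by_cases hy : y = pad
    · unfold aTrim
      rw [hlen, aFindLast, hget, if_neg (by simp [hy])]
      rw [aFindLast_append pad ys [y] ys.length (le_refl _)]
      rw [hy, rtrim_append_pad, ← ih]
      unfold aTrim
      cases h : aFindLast pad ys ys.length with
      | none => rfl
      | some i =>
        have hi : i < ys.length := aFindLast_lt pad ys ys.length i h
        exact List.take_append_of_le_length (by omega)
    · unfold aTrim
      rw [hlen, aFindLast, hget, if_pos hy]
      rw [rtrim_append_nonpad pad y hy]
      show List.take (ys.length + 1) (ys ++ [y]) = ys ++ [y]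
      rw [← hlen, List.take_length]

-- B's fold, characterised by a direct recursion
def bCore (pad : Int) : Nat → List Int → List Int
  | _, [] => []
  | k, x :: xs => if x = pad then bCore pad (k + 1) xs else List.replicate k pad ++ x :: bCore pad 0 xs

theorem bFold_eq_core (pad : Int) (xs : List Int) :
    ∀ acc k, (xs.foldl (bStep pad) (acc, k)).1 = acc ++ bCore pad k xs := by
  induction xs with
  | nil => intro acc k; simp [bCore]
  | cons x xs ih =>
    intro acc k
    by_cases hx : x = pad
    · simp [bStep, bCore, hx, ih]
    · simp [bStep, bCore, hx, ih]

theorem bCore_eq_rtrim (pad : Int) (xs : List Int) :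
    ∀ k, bCore pad k xs = match rtrim pad xs with
      | [] => []
      | r => List.replicate k pad ++ r := by
  induction xs with
  | nil => intro k; simp [bCore, rtrim]
  | cons x xs ih =>
    intro k
    by_cases hx : x = pad
    · rw [bCore, if_pos hx, ih (k + 1)]
      show _ = (match (match rtrim pad xs with
          | [] => if x = pad then [] else [x]
          | r => x :: r) with
        | [] => []
        | r => List.replicate k pad ++ r)
      cases h : rtrim pad xs with
      | nil => simp [hx]
      | cons a l => simp [hx, List.replicate_succ' (n := k)]
    · rw [bCore, if_neg hx, ih 0]
      show _ = (match (match rtrim pad xs with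
          | [] => if x = pad then [] else [x]
          | r => x :: r) with
        | [] => []
        | r => List.replicate k pad ++ r)
      cases h : rtrim pad xs with
      | nil => simp [hx]
      | cons a l => simp

theorem bTrim_eq_rtrim (pad : Int) (seq : List Int) :
    (seq.foldl (bStep pad) ([], 0)).1 = rtrim pad seq := by
  rw [bFold_eq_core pad seq [] 0, bCore_eq_rtrim pad seq 0]
  cases h : rtrim pad seq <;> simp

-- ===== VERDICT (by name: the statement is the Claim_ definition above) =====
theorem remove_right_padding_py_spec : Claim_equal_remove_right_padding_py := by
  intro token_ids padding_token _
  unfold Spec_remove_right_padding_py remove_right_padding_py remove_right_padding_py_alt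
  apply List.map_congr_left
  intro seq _
  rw [bTrim_eq_rtrim, ← aTrim_eq_rtrim]
  rfl
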